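-- pv_equiv track=rewrite | github.com/prasadaherzip/VJTI | SEM2/JAVA LAB/LAB6.py | groupAndSortOwners
-- ===== SOURCE A (Python) =====
-- def groupAndSortOwners(files):
--     result = {}
--
--     for file, owner in files.items():
--         if owner not in result:
--             result[owner] = []
--         result[owner].append(file)
--
--     # sort filenames for each owner
--     for owner in result:
--         result[owner].sort()
--
--     return result
-- ===== SOURCE B (Python) =====
-- def groupAndSortOwners(files):
--     # one global sort by filename (unique dict keys) replaces the per-owner sorts
--     result = {owner: [] for owner in files.values()}
--     for file, owner in sorted(files.items(), key=lambda item: item[0]):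
--         result[owner].append(file)
--     return result
-- ===== Notes on version B (the rewrite author's own statement) =====
-- stated objective: alternative
-- what changed: B replaces A's group-then-sort-each-list decomposition (a dict fill pass followed by a per-owner .sort() loop) by one global sort of the items by filename followed by a single grouping pass that builds each owner's list already sorted.
import Mathlib
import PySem

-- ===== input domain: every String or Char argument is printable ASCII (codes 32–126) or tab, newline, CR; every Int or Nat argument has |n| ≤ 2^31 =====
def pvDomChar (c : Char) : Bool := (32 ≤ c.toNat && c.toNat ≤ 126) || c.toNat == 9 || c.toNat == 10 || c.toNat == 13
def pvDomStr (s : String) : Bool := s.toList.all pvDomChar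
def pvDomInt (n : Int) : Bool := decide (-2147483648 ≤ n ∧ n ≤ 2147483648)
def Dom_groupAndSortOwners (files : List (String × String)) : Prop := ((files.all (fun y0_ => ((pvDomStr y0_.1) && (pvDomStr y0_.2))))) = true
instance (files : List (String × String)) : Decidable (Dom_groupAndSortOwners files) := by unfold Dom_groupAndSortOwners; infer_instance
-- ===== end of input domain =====

-- B replaces A's per-owner sorts by one global sort of the items by filename before a single grouping pass (alternative decomposition, same cost).
-- The 'files' dict parameter arrives as an association list; both ports read it through PySem.Dict.ofList (Python's dict construction).

-- ===== PORT A =====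
def groupAndSortOwners (files : List (String × String)) : List (String × List String) :=
  let items := (PySem.Dict.ofList files).items
  -- for file, owner in files.items(): if owner not in result: result[owner] = []; result[owner].append(file)
  let result := items.foldl (fun (d : PySem.Dict String (List String)) p =>
    let d := if d.contains p.2 then d else d.insert p.2 ([] : List String)
    d.modify p.2 [] (fun l => l ++ [p.1])) PySem.Dict.empty
  -- for owner in result: result[owner].sort()
  let result := result.keys.foldl (fun (d : PySem.Dict String (List String)) k =>
    d.modify k [] (fun l => PySem.List.sorted l (fun x => x) false)) result
  result.items

-- ===== PORT B =====
def groupAndSortOwners_alt (files : List (String × String)) : List (String × List String) :=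
  let items := (PySem.Dict.ofList files).items
  -- result = {owner: [] for owner in files.values()}
  let result := items.foldl (fun (d : PySem.Dict String (List String)) p =>
    d.insert p.2 ([] : List String)) PySem.Dict.empty
  -- for file, owner in sorted(files.items(), key=lambda item: item[0]): result[owner].append(file)
  -- (result[owner] is always present here; modify with default [] is exact on present keys)
  let result := (PySem.List.sorted items Prod.fst false).foldl
    (fun (d : PySem.Dict String (List String)) p => d.modify p.2 [] (fun l => l ++ [p.1])) result
  result.items

-- ===== PRECONDITION & SPEC =====
def Spec_groupAndSortOwners (files : List (String × String)) (out : List (String × List String)) : Prop := out = groupAndSortOwners_alt files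
instance (files : List (String × String)) (out : List (String × List String)) : Decidable (Spec_groupAndSortOwners files out) := by unfold Spec_groupAndSortOwners; infer_instance

-- ===== CLAIM (what is proved, stated in full; the proofs are below) =====
def Claim_equal_groupAndSortOwners : Prop := ∀ (files : List (String × String)), Dom_groupAndSortOwners files → Spec_groupAndSortOwners files (groupAndSortOwners files)

-- ===== LEMMAS AND PROOFS =====

-- files of owner k, in the order of l
def pvFilesOf (k : String) (l : List (String × String)) : List String :=
  (l.filter (fun p => p.2 == k)).map Prod.fst

-- A's first loop: the guarded insert before the append is the same step as a plain modify-with-default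
theorem stepA_eq (d : PySem.Dict String (List String)) (p : String × String) :
    (let d' := if d.contains p.2 then d else d.insert p.2 ([] : List String)
     d'.modify p.2 [] (fun l => l ++ [p.1])) = d.modify p.2 [] (fun l => l ++ [p.1]) := by
  by_cases h : d.contains p.2
  · simp [h]
  · replace h : d.contains p.2 = false := by simpa using h
    have hk : ∀ q ∈ d.items, q.1 ≠ p.2 := by
      intro q hq hqk
      have : d.contains p.2 = true := by
        rw [PySem.Dict.contains_iff_mem_keys]
        exact hqk ▸ PySem.Dict.mem_keys_of_mem_items d hq
      simp [this] at h
    have hfind : d.items.find? (fun q => q.1 == p.2) = none := by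
      rw [List.find?_eq_none]
      intro q hq
      simpa using hk q hq
    have hg : PySem.Dict.getD { items := d.items ++ [(p.2, ([] : List String))] } p.2 [] = [] := by
      have h2 : PySem.Dict.get? { items := d.items ++ [(p.2, ([] : List String))] } p.2 = some [] := by
        simp [PySem.Dict.get?, List.find?_append, hfind]
      simp [PySem.Dict.getD_eq_get?_getD, h2]
    have hg0 : d.getD p.2 [] = [] := PySem.Dict.getD_of_not_contains d [] h
    simp [PySem.Dict.modify, PySem.Dict.insert, h, hg, hg0]
    conv_rhs => rw [← List.map_id d.items]
    apply List.map_congr_left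
    intro q hq
    simp [hk q hq]

-- grouping fold: value at k collects the files of owner k in list order
theorem getD_groupFold (l : List (String × String)) (d : PySem.Dict String (List String)) (k : String) :
    (l.foldl (fun d p => d.modify p.2 [] (fun v => v ++ [p.1])) d).getD k []
      = d.getD k [] ++ pvFilesOf k l := by
  have h := PySem.Dict.getD_foldl_modify_append (l := l.map Prod.swap) (d := d) (c := k)
  rw [List.foldl_map] at h
  simpa [pvFilesOf, List.filter_map, Function.comp, List.map_map] using h

-- grouping fold: its keys are the starting keys extended by the owners
theorem keys_groupFold (l : List (String × String)) (d : PySem.Dict String (List String)) :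
    (l.foldl (fun d p => d.modify p.2 [] (fun v => v ++ [p.1])) d).keys
      = PySem.Set.update d.keys (l.map Prod.snd) :=
  PySem.Dict.keys_foldl_modify_key l Prod.snd [] (fun _ p v => v ++ [p.1]) d

-- A's sorting loop leaves keys it does not visit alone
theorem getD_sortFold_not_mem (ks : List String) (d : PySem.Dict String (List String))
    (j : String) (hj : j ∉ ks) :
    (ks.foldl (fun d k => d.modify k [] (fun v => PySem.List.sorted v (fun x => x) false)) d).getD j []
      = d.getD j [] := by
  induction ks generalizing d with
  | nil => rfl
  | cons a t ih =>
    simp only [List.mem_cons, not_or] at hj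
    rw [List.foldl_cons, ih _ hj.2, PySem.Dict.getD_modify]
    simp [hj.1]

-- A's sorting loop sorts the value at each visited key once
theorem getD_sortFold_mem (ks : List String) (d : PySem.Dict String (List String))
    (j : String) (hnd : ks.Nodup) (hj : j ∈ ks) :
    (ks.foldl (fun d k => d.modify k [] (fun v => PySem.List.sorted v (fun x => x) false)) d).getD j []
      = PySem.List.sorted (d.getD j []) (fun x => x) false := by
  induction ks generalizing d with
  | nil => cases hj
  | cons a t ih =>
    rw [List.foldl_cons]
    rcases List.mem_cons.mp hj with rfl | hjt
    · rw [getD_sortFold_not_mem t _ j (List.nodup_cons.mp hnd).1, PySem.Dict.getD_modify]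
      simp
    · rw [ih _ (List.nodup_cons.mp hnd).2 hjt, PySem.Dict.getD_modify]
      have : j ≠ a := fun h => (List.nodup_cons.mp hnd).1 (h ▸ hjt)
      simp [this]

-- B's comprehension fold keeps every value []
theorem getD_fillFold (l : List (String × String)) (d : PySem.Dict String (List String))
    (k : String) (hd : d.getD k [] = []) :
    (l.foldl (fun d p => d.insert p.2 ([] : List String)) d).getD k [] = [] := by
  induction l generalizing d with
  | nil => exact hd
  | cons p t ih =>
    rw [List.foldl_cons]
    apply ih
    rw [PySem.Dict.getD_insert]
    split_ifs <;> simp [hd]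

-- updating a set with elements it already has changes nothing
theorem set_update_of_subset (s xs : List String) (h : ∀ x ∈ xs, x ∈ s) :
    PySem.Set.update s xs = s := by
  rw [PySem.Set.update_eq_append_filter]
  have hnil : (PySem.Set.ofList xs).filter (fun y => !(PySem.Set.contains s y)) = [] := by
    rw [List.filter_eq_nil_iff]
    intro a ha
    simpa using h a ((PySem.Set.mem_ofList _ _).mp ha)
  rw [hnil, List.append_nil]

-- the core exchange: per-owner sort of A = global sort by (unique) filename then filter, as in B
theorem sorted_filesOf (items : List (String × String)) (hnd : (items.map Prod.fst).Nodup)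
    (k : String) :
    PySem.List.sorted (pvFilesOf k items) (fun x => x) false
      = pvFilesOf k (PySem.List.sorted items Prod.fst false) := by
  apply PySem.List.sorted_eq_of_perm_of_pairwise_lt
  · exact ((PySem.List.sorted_perm items Prod.fst false).filter _).map Prod.fst
  · have h1 : (PySem.List.sorted items Prod.fst false).Pairwise (fun a b => a.1 ≤ b.1) :=
      PySem.List.sorted_pairwise items Prod.fst
    have h2 : (PySem.List.sorted items Prod.fst false).Pairwise (fun a b => a.1 ≠ b.1) :=
      List.pairwise_map.mp
        (((PySem.List.sorted_perm items Prod.fst false).map Prod.fst).nodup_iff.mpr hnd)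
    exact List.pairwise_map.mpr
      (((h1.and h2).imp (fun h => lt_of_le_of_ne h.1 h.2)).filter _)

-- ===== VERDICT (by name: the statement is the Claim_ definition above) =====
theorem groupAndSortOwners_spec : Claim_equal_groupAndSortOwners := by
  intro files _
  unfold Spec_groupAndSortOwners groupAndSortOwners groupAndSortOwners_alt
  have hstepA : (fun (d : PySem.Dict String (List String)) (p : String × String) =>
      (let d' := if d.contains p.2 then d else d.insert p.2 ([] : List String)
       d'.modify p.2 [] (fun l => l ++ [p.1])))
      = (fun d p => d.modify p.2 [] (fun v => v ++ [p.1])) :=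
    funext fun d => funext fun p => stepA_eq d p
  rw [hstepA]
  set items := (PySem.Dict.ofList files).items with hitems
  have hndfst : (items.map Prod.fst).Nodup := PySem.Dict.nodup_keys_ofList files
  -- A's grouping dict
  set F := items.foldl (fun d p => d.modify p.2 [] (fun v => v ++ [p.1])) PySem.Dict.empty with hF
  have hkeysF : F.keys = PySem.Set.ofList (items.map Prod.snd) := by
    rw [hF, keys_groupFold]
    simp [PySem.Set.update_nil_left]
  have hndF : F.keys.Nodup := by rw [hkeysF]; exact PySem.Set.nodup_ofList _
  have hgetF : ∀ k, F.getD k [] = pvFilesOf k items := by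
    intro k
    rw [hF, getD_groupFold]
    simp
  -- A's result after the sorting loop
  set G := F.keys.foldl (fun d k => d.modify k [] (fun v => PySem.List.sorted v (fun x => x) false)) F with hG
  have hkeysG : G.keys = F.keys := by
    rw [hG, PySem.Dict.keys_foldl_modify F.keys []
      (fun _ _ v => PySem.List.sorted v (fun x => x) false) F]
    exact set_update_of_subset F.keys F.keys (fun x h => h)
  have hndG : G.keys.Nodup := hkeysG ▸ hndF
  -- B's comprehension dict
  set F1 := items.foldl (fun d p => d.insert p.2 ([] : List String)) PySem.Dict.empty with hF1
  have hkeysF1 : F1.keys = PySem.Set.ofList (items.map Prod.snd) := by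
    rw [hF1, PySem.Dict.keys_foldl_insert_key items Prod.snd (fun _ _ => []) PySem.Dict.empty]
    simp [PySem.Set.update_nil_left]
  have hgetF1 : ∀ k, F1.getD k [] = [] := fun k => getD_fillFold items PySem.Dict.empty k (by simp)
  -- B's result after the filling pass
  set S := PySem.List.sorted items Prod.fst false with hS
  set G1 := S.foldl (fun d p => d.modify p.2 [] (fun v => v ++ [p.1])) F1 with hG1
  have hkeysG1 : G1.keys = F1.keys := by
    rw [hG1, keys_groupFold]
    apply set_update_of_subset
    intro x hx
    rw [hkeysF1]
    rcases List.mem_map.mp hx with ⟨p, hp, rfl⟩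
    exact (PySem.Set.mem_ofList _ _).mpr (List.mem_map_of_mem ((PySem.List.mem_sorted _ _ _ _).mp hp))
  have hndG1 : G1.keys.Nodup := by
    rw [hkeysG1, hkeysF1]; exact PySem.Set.nodup_ofList _
  have hgetG1 : ∀ k, G1.getD k [] = pvFilesOf k S := by
    intro k
    rw [hG1, getD_groupFold, hgetF1]
    simp
  -- both items lists, key by key
  rw [PySem.Dict.items_eq_map_keys G hndG [], PySem.Dict.items_eq_map_keys G1 hndG1 [],
      hkeysG, hkeysG1, hkeysF1, hkeysF]
  apply List.map_congr_left
  intro k hk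
  have hkF : k ∈ F.keys := hkeysF ▸ hk
  rw [hG, getD_sortFold_mem F.keys F k hndF hkF, hgetF, hgetG1, hS,
      sorted_filesOf items hndfst k]
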